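-- pv_equiv track=rewrite | github.com/pypi-data/pypi-mirror-34 | packages/voice-robotifier/voice_robotifier-1.1.tar.gz/voice_robotifier-1.1/voice_robotifier/voice_robotifier.py | uncensor
-- ===== SOURCE A (Python) =====
-- def uncensor(text):
--     censored = {
--         'f***': 'fuck',
--         's***': 'shit',
--         'b****': 'bitch',
--         'a**': 'ass'
--     }
--     for key,val in censored.items():
--         text = text.replace(key,val)
--     return text
-- ===== SOURCE B (Python) =====
-- def uncensor(text):
--     tokens = (('f***', 'fuck'), ('s***', 'shit'), ('b****', 'bitch'), ('a**', 'ass'))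
--     out = []
--     i = 0
--     n = len(text)
--     while i < n:
--         for key, val in tokens:
--             if text.startswith(key, i):
--                 out.append(val)
--                 i += len(key)
--                 break
--         else:
--             out.append(text[i])
--             i += 1
--     return ''.join(out)
-- ===== Notes on version B (the rewrite author's own statement) =====
-- stated objective: alternative
-- what changed: Replaces four sequential full-string str.replace passes by a single left-to-right scan that at each position tries the four censored tokens in order and emits the uncensored word or the current character.
import Mathlib
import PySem

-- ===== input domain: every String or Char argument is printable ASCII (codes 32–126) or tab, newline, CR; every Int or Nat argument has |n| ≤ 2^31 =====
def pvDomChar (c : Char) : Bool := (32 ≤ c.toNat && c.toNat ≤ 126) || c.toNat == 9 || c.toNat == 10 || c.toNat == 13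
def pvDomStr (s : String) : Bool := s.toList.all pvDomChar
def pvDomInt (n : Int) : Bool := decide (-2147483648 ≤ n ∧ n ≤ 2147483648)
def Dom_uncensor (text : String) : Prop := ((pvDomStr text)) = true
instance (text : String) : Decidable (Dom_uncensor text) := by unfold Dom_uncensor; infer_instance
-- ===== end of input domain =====

-- B replaces A's four sequential full-string replace passes by one left-to-right scan
-- dispatching on the four tokens (objective: alternative single-pass algorithm; same result).

-- ===== PORT A =====
def uncensor (text : String) : String :=
  let censored : PySem.Dict String String :=
    PySem.Dict.ofList [("f***", "fuck"), ("s***", "shit"), ("b****", "bitch"), ("a**", "ass")]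
  censored.items.foldl (fun t kv => PySem.Str.replace t kv.1 kv.2) text

-- ===== PORT B =====
-- the while/for-else scan of Source B: at each position try the four keys in order
def uncensorScan : List Char → List Char
  | [] => []
  | c :: t =>
    if ("f***".toList).isPrefixOf (c :: t) then "fuck".toList ++ uncensorScan ((c :: t).drop 4)
    else if ("s***".toList).isPrefixOf (c :: t) then "shit".toList ++ uncensorScan ((c :: t).drop 4)
    else if ("b****".toList).isPrefixOf (c :: t) then "bitch".toList ++ uncensorScan ((c :: t).drop 5)
    else if ("a**".toList).isPrefixOf (c :: t) then "ass".toList ++ uncensorScan ((c :: t).drop 3)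
    else c :: uncensorScan t
  termination_by l => l.length
  decreasing_by all_goals (simp [List.length_drop]; try omega)

def uncensor_alt (text : String) : String :=
  String.ofList (uncensorScan text.toList)

-- ===== PRECONDITION & SPEC =====
def Spec_uncensor (text : String) (out : String) : Prop := out = uncensor_alt text
instance (text : String) (out : String) : Decidable (Spec_uncensor text out) := by unfold Spec_uncensor; infer_instance

-- ===== CLAIM (what is proved, stated in full; the proofs are below) =====
def Claim_equal_uncensor : Prop := ∀ (text : String), Dom_uncensor text → Spec_uncensor text (uncensor text)

-- ===== LEMMAS AND PROOFS =====

-- clean recursive form of Python str.replace for a nonempty pattern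
def rep (key new : List Char) : List Char → List Char
  | [] => []
  | c :: t =>
    if _h : key ≠ [] ∧ key.isPrefixOf (c :: t) then new ++ rep key new ((c :: t).drop key.length)
    else c :: rep key new t
  termination_by l => l.length
  decreasing_by
  · obtain ⟨h1, h2⟩ := _h
    have hk : 1 ≤ key.length := by cases key with | nil => simp at h1 | cons a b => simp
    simp [List.length_drop]; omega
  · simp

theorem go_eq (old new : List Char) (ho : old ≠ []) :
    ∀ (fuel : Nat) (l acc : List Char), l.length ≤ fuel →
      PySem.Chars.replace.go old new fuel l acc = acc.reverse ++ rep old new l := by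
  intro fuel
  induction fuel with
  | zero =>
    intro l acc h
    have : l = [] := by cases l with | nil => rfl | cons c t => simp at h
    subst this
    simp [PySem.Chars.replace.go, rep]
  | succ n ih =>
    intro l acc h
    cases l with
    | nil => simp [PySem.Chars.replace.go, rep]
    | cons c t =>
      rw [PySem.Chars.replace.go]
      by_cases hp : old.isPrefixOf (c :: t)
      · have h1 : ((c :: t).drop old.length).length ≤ n := by
          have hk : 1 ≤ old.length := by cases old with | nil => simp at ho | cons a b => simp
          simp [List.length_drop] at *
          omega
        rw [if_pos hp, ih _ _ h1, rep]
        simp [ho, hp]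
      · have h1 : t.length ≤ n := by simp at h; omega
        rw [if_neg hp, ih _ _ h1, rep]
        simp [hp]

theorem replace_eq_rep (s old new : List Char) (ho : old ≠ []) :
    PySem.Chars.replace s old new = rep old new s := by
  rw [PySem.Chars.replace]
  have : old.isEmpty = false := by cases old with | nil => simp at ho | cons a b => rfl
  rw [this]
  simpa using go_eq old new ho s.length s [] (le_refl _)

-- stepping over a char that is not the key's head
theorem rep_cons_ne (k0 : Char) (kr new : List Char) (c : Char) (t : List Char) (h : c ≠ k0) :
    rep (k0 :: kr) new (c :: t) = c :: rep (k0 :: kr) new t := by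
  rw [rep]
  have : ¬ (k0 :: kr).isPrefixOf (c :: t) := by
    simp [List.isPrefixOf_iff_prefix]
    intro hc
    exact absurd hc.symm h
  simp [this]

-- stepping over a whole word none of whose chars is the key's head
theorem rep_word (k0 : Char) (kr new : List Char) (w t : List Char) (h : ∀ c ∈ w, c ≠ k0) :
    rep (k0 :: kr) new (w ++ t) = w ++ rep (k0 :: kr) new t := by
  induction w with
  | nil => simp
  | cons c w ih =>
    simp only [List.cons_append]
    rw [rep_cons_ne _ _ _ _ _ (h c (by simp)), ih (fun c hc => h c (by simp [hc]))]

-- a match at the front is replaced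
theorem rep_matched (key new t : List Char) (hk : key ≠ []) :
    rep key new (key ++ t) = new ++ rep key new t := by
  cases key with
  | nil => simp at hk
  | cons k0 kr =>
    rw [show (k0 :: kr) ++ t = k0 :: (kr ++ t) by simp, rep]
    have hp : (k0 :: kr).isPrefixOf (k0 :: (kr ++ t)) := by
      simp [List.isPrefixOf_iff_prefix]
    simp [hp, List.drop_left']

-- rep with a non-star-headed key and star-free replacement preserves star prefixes
theorem rep_star_prefix (k0 : Char) (kr new : List Char) (h0 : k0 ≠ '*')
    (hn : '*' ∉ new) (hne : new ≠ []) :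
    ∀ (t : List Char) (j : Nat),
      (List.replicate j '*' <+: rep (k0 :: kr) new t ↔ List.replicate j '*' <+: t) := by
  intro t
  induction t with
  | nil => intro j; rw [rep]
  | cons c t ih =>
    intro j
    cases j with
    | zero => simp
    | succ j =>
      rw [rep, List.replicate_succ]
      by_cases hp : ((k0 :: kr) : List Char).isPrefixOf (c :: t)
      · have hc : k0 = c := (List.cons_prefix_cons.mp (List.isPrefixOf_iff_prefix.mp hp)).1
        rw [dif_pos ⟨by simp, hp⟩]
        cases new with
        | nil => exact absurd rfl hne
        | cons n0 nr =>
          have hL : ¬ ('*' :: List.replicate j '*' <+: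
              (n0 :: nr) ++ rep (k0 :: kr) (n0 :: nr) ((c :: t).drop (k0 :: kr).length)) := by
            intro hpre
            have h1 : '*' = n0 := (List.cons_prefix_cons.mp (by simpa using hpre)).1
            exact hn (by simp [← h1])
          have hR : ¬ ('*' :: List.replicate j '*' <+: c :: t) := by
            intro hpre
            have h1 : '*' = c := (List.cons_prefix_cons.mp hpre).1
            exact h0 (hc.trans h1.symm)
          exact iff_of_false hL hR
      · rw [dif_neg (by simp [hp])]
        constructor
        · intro hpre
          rcases List.cons_prefix_cons.mp hpre with ⟨hc, hrest⟩
          exact List.cons_prefix_cons.mpr ⟨hc, (ih j).mp hrest⟩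
        · intro hpre
          rcases List.cons_prefix_cons.mp hpre with ⟨hc, hrest⟩
          exact List.cons_prefix_cons.mpr ⟨hc, (ih j).mpr hrest⟩

-- not a prefix: step one char
theorem rep_not_pref (key new : List Char) (c : Char) (t : List Char)
    (h : ¬ key.isPrefixOf (c :: t)) :
    rep key new (c :: t) = c :: rep key new t := by
  rw [rep]; simp [h]

-- specialized forms for the four keys
theorem prefF_iff (c : Char) (X : List Char) :
    ("f***".toList).isPrefixOf (c :: X) ↔ (c = 'f' ∧ List.replicate 3 '*' <+: X) := by
  rw [show "f***".toList = 'f' :: List.replicate 3 '*' from rfl, List.isPrefixOf_iff_prefix,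
    List.cons_prefix_cons]
  exact ⟨fun ⟨h1, h2⟩ => ⟨h1.symm, h2⟩, fun ⟨h1, h2⟩ => ⟨h1.symm, h2⟩⟩

theorem prefS_iff (c : Char) (X : List Char) :
    ("s***".toList).isPrefixOf (c :: X) ↔ (c = 's' ∧ List.replicate 3 '*' <+: X) := by
  rw [show "s***".toList = 's' :: List.replicate 3 '*' from rfl, List.isPrefixOf_iff_prefix,
    List.cons_prefix_cons]
  exact ⟨fun ⟨h1, h2⟩ => ⟨h1.symm, h2⟩, fun ⟨h1, h2⟩ => ⟨h1.symm, h2⟩⟩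

theorem prefB_iff (c : Char) (X : List Char) :
    ("b****".toList).isPrefixOf (c :: X) ↔ (c = 'b' ∧ List.replicate 4 '*' <+: X) := by
  rw [show "b****".toList = 'b' :: List.replicate 4 '*' from rfl, List.isPrefixOf_iff_prefix,
    List.cons_prefix_cons]
  exact ⟨fun ⟨h1, h2⟩ => ⟨h1.symm, h2⟩, fun ⟨h1, h2⟩ => ⟨h1.symm, h2⟩⟩

theorem prefA_iff (c : Char) (X : List Char) :
    ("a**".toList).isPrefixOf (c :: X) ↔ (c = 'a' ∧ List.replicate 2 '*' <+: X) := by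
  rw [show "a**".toList = 'a' :: List.replicate 2 '*' from rfl, List.isPrefixOf_iff_prefix,
    List.cons_prefix_cons]
  exact ⟨fun ⟨h1, h2⟩ => ⟨h1.symm, h2⟩, fun ⟨h1, h2⟩ => ⟨h1.symm, h2⟩⟩

theorem repF_word (w t : List Char) (h : ('f' : Char) ∉ w) :
    rep "f***".toList "fuck".toList (w ++ t) = w ++ rep "f***".toList "fuck".toList t := by
  rw [show "f***".toList = 'f' :: "***".toList from rfl]
  exact rep_word _ _ _ _ _ (fun c hc he => h (he ▸ hc))

theorem repS_word (w t : List Char) (h : ('s' : Char) ∉ w) :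
    rep "s***".toList "shit".toList (w ++ t) = w ++ rep "s***".toList "shit".toList t := by
  rw [show "s***".toList = 's' :: "***".toList from rfl]
  exact rep_word _ _ _ _ _ (fun c hc he => h (he ▸ hc))

theorem repB_word (w t : List Char) (h : ('b' : Char) ∉ w) :
    rep "b****".toList "bitch".toList (w ++ t) = w ++ rep "b****".toList "bitch".toList t := by
  rw [show "b****".toList = 'b' :: "****".toList from rfl]
  exact rep_word _ _ _ _ _ (fun c hc he => h (he ▸ hc))

theorem repA_word (w t : List Char) (h : ('a' : Char) ∉ w) :
    rep "a**".toList "ass".toList (w ++ t) = w ++ rep "a**".toList "ass".toList t := by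
  rw [show "a**".toList = 'a' :: "**".toList from rfl]
  exact rep_word _ _ _ _ _ (fun c hc he => h (he ▸ hc))

theorem repF_star (t : List Char) (j : Nat) :
    List.replicate j '*' <+: rep "f***".toList "fuck".toList t ↔ List.replicate j '*' <+: t := by
  rw [show "f***".toList = 'f' :: "***".toList from rfl]
  exact rep_star_prefix _ _ _ (by decide) (by decide) (by decide) t j

theorem repS_star (t : List Char) (j : Nat) :
    List.replicate j '*' <+: rep "s***".toList "shit".toList t ↔ List.replicate j '*' <+: t := by
  rw [show "s***".toList = 's' :: "***".toList from rfl]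
  exact rep_star_prefix _ _ _ (by decide) (by decide) (by decide) t j

theorem repB_star (t : List Char) (j : Nat) :
    List.replicate j '*' <+: rep "b****".toList "bitch".toList t ↔ List.replicate j '*' <+: t := by
  rw [show "b****".toList = 'b' :: "****".toList from rfl]
  exact rep_star_prefix _ _ _ (by decide) (by decide) (by decide) t j

theorem notF_head (c : Char) (t : List Char) (h : c ≠ 'f') :
    ¬ ("f***".toList).isPrefixOf (c :: t) := by
  rw [prefF_iff]; rintro ⟨h1, -⟩; exact h h1

theorem notS_head (c : Char) (t : List Char) (h : c ≠ 's') :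
    ¬ ("s***".toList).isPrefixOf (c :: t) := by
  rw [prefS_iff]; rintro ⟨h1, -⟩; exact h h1

theorem notB_head (c : Char) (t : List Char) (h : c ≠ 'b') :
    ¬ ("b****".toList).isPrefixOf (c :: t) := by
  rw [prefB_iff]; rintro ⟨h1, -⟩; exact h h1

-- the chain of the four replace passes equals the single scan
theorem chain_eq_scan : ∀ (n : Nat) (t : List Char), t.length ≤ n →
    rep "a**".toList "ass".toList (rep "b****".toList "bitch".toList
      (rep "s***".toList "shit".toList (rep "f***".toList "fuck".toList t)))
    = uncensorScan t := by
  intro n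
  induction n with
  | zero =>
    intro t ht
    have : t = [] := by cases t with | nil => rfl | cons c t => simp at ht
    subst this
    simp [rep, uncensorScan]
  | succ n ih =>
    intro t ht
    cases t with
    | nil => simp [rep, uncensorScan]
    | cons c t =>
      by_cases hF : ("f***".toList).isPrefixOf (c :: t)
      · rcases List.isPrefixOf_iff_prefix.mp hF with ⟨u, hu⟩
        have hlen : u.length ≤ n := by
          have := congrArg List.length hu
          simp at this ht
          omega
        rw [← hu, rep_matched _ _ _ (by decide),
          repS_word _ _ (by decide), repB_word _ _ (by decide), repA_word _ _ (by decide),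
          show "f***".toList ++ u = 'f' :: '*' :: '*' :: '*' :: u from rfl,
          uncensorScan, if_pos (by simp [List.isPrefixOf])]
        rw [show ('f' :: '*' :: '*' :: '*' :: u).drop 4 = u from rfl, ih u hlen]
      · by_cases hS : ("s***".toList).isPrefixOf (c :: t)
        · rcases List.isPrefixOf_iff_prefix.mp hS with ⟨u, hu⟩
          have hlen : u.length ≤ n := by
            have := congrArg List.length hu
            simp at this ht
            omega
          rw [← hu, repF_word _ _ (by decide), rep_matched _ _ _ (by decide),
            repB_word _ _ (by decide), repA_word _ _ (by decide),
            show "s***".toList ++ u = 's' :: '*' :: '*' :: '*' :: u from rfl,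
            uncensorScan, if_neg (notF_head _ _ (by decide)),
            if_pos (by simp [List.isPrefixOf])]
          rw [show ('s' :: '*' :: '*' :: '*' :: u).drop 4 = u from rfl, ih u hlen]
        · by_cases hB : ("b****".toList).isPrefixOf (c :: t)
          · rcases List.isPrefixOf_iff_prefix.mp hB with ⟨u, hu⟩
            have hlen : u.length ≤ n := by
              have := congrArg List.length hu
              simp at this ht
              omega
            rw [← hu, repF_word _ _ (by decide), repS_word _ _ (by decide),
              rep_matched _ _ _ (by decide), repA_word _ _ (by decide),
              show "b****".toList ++ u = 'b' :: '*' :: '*' :: '*' :: '*' :: u from rfl,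
              uncensorScan, if_neg (notF_head _ _ (by decide)),
              if_neg (notS_head _ _ (by decide)),
              if_pos (by simp [List.isPrefixOf])]
            rw [show ('b' :: '*' :: '*' :: '*' :: '*' :: u).drop 5 = u from rfl, ih u hlen]
          · by_cases hA : ("a**".toList).isPrefixOf (c :: t)
            · rcases List.isPrefixOf_iff_prefix.mp hA with ⟨u, hu⟩
              have hlen : u.length ≤ n := by
                have := congrArg List.length hu
                simp at this ht
                omega
              rw [← hu, repF_word _ _ (by decide), repS_word _ _ (by decide),
                repB_word _ _ (by decide), rep_matched _ _ _ (by decide),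
                show "a**".toList ++ u = 'a' :: '*' :: '*' :: u from rfl,
                uncensorScan, if_neg (notF_head _ _ (by decide)),
                if_neg (notS_head _ _ (by decide)),
                if_neg (notB_head _ _ (by decide)),
                if_pos (by simp [List.isPrefixOf])]
              rw [show ('a' :: '*' :: '*' :: u).drop 3 = u from rfl, ih u hlen]
            · -- no key matches at this position: every pass steps over c
              have htn : t.length ≤ n := by simp at ht; omega
              have hS' : ¬ ("s***".toList).isPrefixOf (c :: rep "f***".toList "fuck".toList t) := by
                rw [prefS_iff] at hS ⊢
                rintro ⟨h1, h2⟩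
                exact hS ⟨h1, (repF_star t 3).mp h2⟩
              have hB' : ¬ ("b****".toList).isPrefixOf
                  (c :: rep "s***".toList "shit".toList (rep "f***".toList "fuck".toList t)) := by
                rw [prefB_iff] at hB ⊢
                rintro ⟨h1, h2⟩
                exact hB ⟨h1, (repF_star t 4).mp ((repS_star _ 4).mp h2)⟩
              have hA' : ¬ ("a**".toList).isPrefixOf
                  (c :: rep "b****".toList "bitch".toList (rep "s***".toList "shit".toList
                    (rep "f***".toList "fuck".toList t))) := by
                rw [prefA_iff] at hA ⊢
                rintro ⟨h1, h2⟩
                exact hA ⟨h1, (repF_star t 2).mp ((repS_star _ 2).mp ((repB_star _ 2).mp h2))⟩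
              rw [rep_not_pref _ _ _ _ hF, rep_not_pref _ _ _ _ hS', rep_not_pref _ _ _ _ hB',
                rep_not_pref _ _ _ _ hA', uncensorScan,
                if_neg hF, if_neg hS, if_neg hB, if_neg hA, ih t htn]

theorem uncensor_toList (text : String) :
    (uncensor text).toList =
      rep "a**".toList "ass".toList (rep "b****".toList "bitch".toList
        (rep "s***".toList "shit".toList (rep "f***".toList "fuck".toList text.toList))) := by
  have e : uncensor text =
      PySem.Str.replace (PySem.Str.replace (PySem.Str.replace
        (PySem.Str.replace text "f***" "fuck") "s***" "shit") "b****" "bitch") "a**" "ass" := rfl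
  rw [e]
  simp only [PySem.Str.toList_replace]
  rw [replace_eq_rep _ _ _ (by decide), replace_eq_rep _ _ _ (by decide),
    replace_eq_rep _ _ _ (by decide), replace_eq_rep _ _ _ (by decide)]

-- ===== VERDICT (by name: the statement is the Claim_ definition above) =====
theorem uncensor_spec : Claim_equal_uncensor := by
  intro text _
  unfold Spec_uncensor uncensor_alt
  rw [← (uncensor_toList text).trans (chain_eq_scan text.toList.length text.toList (le_refl _))]
  simp
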